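-- pv_equiv track=rewrite | github.com/ataudte/demo-playground | sds_mcp_prototype/solidserver_client.py | summarize_dhcp_record
-- ===== SOURCE A (Python) =====
-- def summarize_dhcp_record(record):
--     if not isinstance(record, dict):
--         return None
--
--     summary = {
--         "ip": (
--             record.get("dhcphost_addr")
--             or record.get("ip_address")
--             or record.get("ip_addr")
--             or record.get("hostaddr")
--         ),
--         "mac": (
--             record.get("dhcphost_mac_addr")
--             or record.get("mac_addr")
--             or record.get("mac")
--         ),
--         "name": (
--             record.get("dhcphost_name")
--             or record.get("db_hostname")
--             or record.get("name")
--         ),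
--         "scope": (
--             record.get("dhcpscope_name")
--             or record.get("scope_name")
--         ),
--         "server": (
--             record.get("dhcp_name")
--             or record.get("dhcpsrv_name")
--         ),
--         "site": (
--             record.get("site_name")
--             or record.get("dhcpscope_site_id")
--         ),
--         "state": record.get("dhcphost_state"),
--     }
--
--     return {k: v for k, v in summary.items() if v not in (None, "", "#", "0")}
-- ===== SOURCE B (Python) =====
-- # B: invert the traversal — one pass over the record's own items with a key->(field, rank)
-- # index, keeping per field the lowest-ranked truthy value, instead of probing fixed
-- # candidate keys per field with or-chains.
-- _RANK = {
--     "dhcphost_addr": ("ip", 0), "ip_address": ("ip", 1), "ip_addr": ("ip", 2), "hostaddr": ("ip", 3),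
--     "dhcphost_mac_addr": ("mac", 0), "mac_addr": ("mac", 1), "mac": ("mac", 2),
--     "dhcphost_name": ("name", 0), "db_hostname": ("name", 1), "name": ("name", 2),
--     "dhcpscope_name": ("scope", 0), "scope_name": ("scope", 1),
--     "dhcp_name": ("server", 0), "dhcpsrv_name": ("server", 1),
--     "site_name": ("site", 0), "dhcpscope_site_id": ("site", 1),
--     "dhcphost_state": ("state", 0),
-- }
--
-- _FIELDS = ("ip", "mac", "name", "scope", "server", "site", "state")
--
-- def summarize_dhcp_record(record):
--     if not isinstance(record, dict):
--         return None
--     best = {}  # field -> (rank, value)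
--     for k, v in record.items():
--         if v and k in _RANK:
--             field, r = _RANK[k]
--             cur = best.get(field)
--             if cur is None or r < cur[0]:
--                 best[field] = (r, v)
--     return {f: best[f][1] for f in _FIELDS
--             if f in best and best[f][1] not in ("#", "0")}
-- ===== Notes on version B (the rewrite author's own statement) =====
-- stated objective: alternative
-- what changed: Inverts the traversal: instead of A's seven per-field or-chains that probe fixed candidate keys in the dict, B makes one pass over the record's own items with a key->(field, rank) index, keeping per field the lowest-ranked truthy value, then emits the fields in order filtering '#' and '0'.
import Mathlib
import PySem

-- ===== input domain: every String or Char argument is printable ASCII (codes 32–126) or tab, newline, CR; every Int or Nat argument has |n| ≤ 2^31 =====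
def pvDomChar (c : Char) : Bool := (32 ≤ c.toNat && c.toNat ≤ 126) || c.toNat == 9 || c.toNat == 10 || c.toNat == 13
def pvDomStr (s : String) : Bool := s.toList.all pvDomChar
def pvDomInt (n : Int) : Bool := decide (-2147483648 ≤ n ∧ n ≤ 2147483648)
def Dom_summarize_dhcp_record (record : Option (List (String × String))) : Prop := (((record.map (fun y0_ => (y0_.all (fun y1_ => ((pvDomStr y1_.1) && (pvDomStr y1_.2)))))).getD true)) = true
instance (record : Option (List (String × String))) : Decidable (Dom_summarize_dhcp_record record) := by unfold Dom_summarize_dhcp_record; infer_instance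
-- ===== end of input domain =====

-- B inverts the traversal (one pass over the record's items with a key→(field,rank) index,
-- keeping the lowest-ranked truthy value per field) instead of A's per-field or-chains over
-- fixed candidate keys; return values are proved equal, no speed claim.

-- ===== PORT A =====
-- truthiness of `record.get(k)` (values are strings here)
def pvTruthy (o : Option String) : Bool :=
  match o with
  | none => false
  | some s => s != ""

-- `v not in (None, "", "#", "0")`
def pvKeep (o : Option String) : Bool :=
  !(o == none || o == some "" || o == some "#" || o == some "0")

-- `a or b` on values of `record.get`: first operand if truthy, else second (exact Python `or`)
def pvOr (a b : Option String) : Option String := if pvTruthy a then a else b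

def summarize_dhcp_record (record : Option (List (String × String))) : Option (List (String × String)) :=
  match record with
  | none => none
  | some d =>
    let g : String → Option String := fun k => (PySem.Dict.ofList d).get? k
    let summary : List (String × Option String) :=
      [ ("ip", pvOr (g "dhcphost_addr") (pvOr (g "ip_address") (pvOr (g "ip_addr") (g "hostaddr")))),
        ("mac", pvOr (g "dhcphost_mac_addr") (pvOr (g "mac_addr") (g "mac"))),
        ("name", pvOr (g "dhcphost_name") (pvOr (g "db_hostname") (g "name"))),
        ("scope", pvOr (g "dhcpscope_name") (g "scope_name")),
        ("server", pvOr (g "dhcp_name") (g "dhcpsrv_name")),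
        ("site", pvOr (g "site_name") (g "dhcpscope_site_id")),
        ("state", g "dhcphost_state") ]
    -- {k: v for k, v in summary.items() if v not in (None, "", "#", "0")}; kept values are
    -- strings, so `.getD ""` only unwraps `some`
    some ((summary.filter (fun p => pvKeep p.2)).map (fun p => (p.1, p.2.getD "")))

-- ===== PORT B =====
-- _RANK: key -> (summary field, priority rank); a dict under the type convention (assoc list)
def pvRANK : List (String × String × Nat) :=
  [ ("dhcphost_addr", ("ip", 0)), ("ip_address", ("ip", 1)), ("ip_addr", ("ip", 2)), ("hostaddr", ("ip", 3)),
    ("dhcphost_mac_addr", ("mac", 0)), ("mac_addr", ("mac", 1)), ("mac", ("mac", 2)),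
    ("dhcphost_name", ("name", 0)), ("db_hostname", ("name", 1)), ("name", ("name", 2)),
    ("dhcpscope_name", ("scope", 0)), ("scope_name", ("scope", 1)),
    ("dhcp_name", ("server", 0)), ("dhcpsrv_name", ("server", 1)),
    ("site_name", ("site", 0)), ("dhcpscope_site_id", ("site", 1)),
    ("dhcphost_state", ("state", 0)) ]

-- `k in _RANK` + `_RANK[k]` fused into one first-match lookup
def pvRankOf (k : String) : Option (String × Nat) := pvRANK.lookup k

def pvFields : List String := ["ip", "mac", "name", "scope", "server", "site", "state"]

-- one iteration of B's loop body: `if v and k in _RANK: … if cur is None or r < cur[0]: best[field] = (r, v)`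
def pvBStep (b : PySem.Dict String (Nat × String)) (p : String × String) : PySem.Dict String (Nat × String) :=
  if p.2 = "" then b
  else
    match pvRankOf p.1 with
    | none => b
    | some (f, r) =>
      match b.get? f with
      | none => b.insert f (r, p.2)
      | some cur => if r < cur.1 then b.insert f (r, p.2) else b

def summarize_dhcp_record_alt (record : Option (List (String × String))) : Option (List (String × String)) :=
  match record with
  | none => none
  | some d =>
    let best := (PySem.Dict.ofList d).items.foldl pvBStep PySem.Dict.empty
    -- {f: best[f][1] for f in _FIELDS if f in best and best[f][1] not in ("#", "0")}
    some (pvFields.flatMap (fun f =>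
      match best.get? f with
      | none => []
      | some rv => if rv.2 ≠ "#" ∧ rv.2 ≠ "0" then [(f, rv.2)] else []))

-- ===== PRECONDITION & SPEC =====
def Spec_summarize_dhcp_record (record : Option (List (String × String))) (out : Option (List (String × String))) : Prop := out = summarize_dhcp_record_alt record
instance (record : Option (List (String × String))) (out : Option (List (String × String))) : Decidable (Spec_summarize_dhcp_record record out) := by unfold Spec_summarize_dhcp_record; infer_instance

-- ===== CLAIM (what is proved, stated in full; the proofs are below) =====
def Claim_equal_summarize_dhcp_record : Prop := ∀ (record : Option (List (String × String))), Dom_summarize_dhcp_record record → Spec_summarize_dhcp_record record (summarize_dhcp_record record)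

-- ===== LEMMAS AND PROOFS =====

-- first-match association-list lookup (what Dict.get? computes on the items list)
def myLook : List (String × String) → String → Option String
  | [], _ => none
  | p :: l, x => if p.1 = x then some p.2 else myLook l x

theorem myLook_eq_get? (l : List (String × String)) (x : String) :
    (PySem.Dict.mk l).get? x = myLook l x := by
  induction l with
  | nil => rfl
  | cons p t ih =>
    cases p with
    | mk a b =>
      rw [PySem.Dict.get?_mk_cons]
      by_cases h : a = x <;> simp [myLook, h, ih]

theorem myLook_append (l : List (String × String)) (p : String × String) (x : String) :
    myLook (l ++ [p]) x = (myLook l x).or (if p.1 = x then some p.2 else none) := by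
  induction l with
  | nil => simp [myLook]
  | cons q t ih => by_cases h : q.1 = x <;> simp [myLook, h, ih]

theorem myLook_eq_none (l : List (String × String)) (x : String) (h : x ∉ l.map Prod.fst) :
    myLook l x = none := by
  induction l with
  | nil => rfl
  | cons q t ih =>
    simp only [List.map_cons, List.mem_cons, not_or] at h
    rw [myLook, if_neg (fun e => h.1 e.symm)]
    exact ih (by simpa using h.2)

-- B's loop projected at one field
def pvFStep (f : String) (c : Option (Nat × String)) (p : String × String) : Option (Nat × String) :=
  if p.2 = "" then c
  else
    match pvRankOf p.1 with
    | none => c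
    | some (f', r) =>
      if f' = f then
        match c with
        | none => some (r, p.2)
        | some cur => if r < cur.1 then some (r, p.2) else some cur
      else c

theorem get?_pvBStep (b : PySem.Dict String (Nat × String)) (p : String × String) (f : String) :
    (pvBStep b p).get? f = pvFStep f (b.get? f) p := by
  unfold pvBStep pvFStep
  by_cases hv : p.2 = "" <;> simp [hv]
  rcases h : pvRankOf p.1 with _ | ⟨f', r⟩
  · rfl
  · by_cases hf : f' = f
    · subst hf
      rcases hc : b.get? f' with _ | cur <;> simp [hc]
      split <;> simp [hc]
    · rcases hc : b.get? f' with _ | cur <;>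
        simp [hf, hc, PySem.Dict.get?_insert_of_ne _ _ (fun h => hf h.symm)]
      split <;> simp [PySem.Dict.get?_insert_of_ne _ _ (fun h => hf h.symm)]

theorem foldl_get? (L : List (String × String)) (b : PySem.Dict String (Nat × String)) (f : String) :
    (L.foldl pvBStep b).get? f = L.foldl (pvFStep f) (b.get? f) := by
  induction L generalizing b with
  | nil => rfl
  | cons p t ih => simp [List.foldl_cons, ih, get?_pvBStep]

-- specification of the per-field loop result: first candidate (in rank order, from offset i)
-- whose looked-up value is truthy, with its rank
def pvBestSpec (g : String → Option String) : List String → Nat → Option (Nat × String)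
  | [], _ => none
  | k :: ks, i =>
    match g k with
    | some v => if v ≠ "" then some (i, v) else pvBestSpec g ks (i + 1)
    | none => pvBestSpec g ks (i + 1)

-- truthy part of a lookup (what pvBestSpec actually depends on)
def pvTV (g : String → Option String) (k : String) : Option String :=
  match g k with
  | some v => if v ≠ "" then some v else none
  | none => none

theorem pvBestSpec_cons_tv (g : String → Option String) (k : String) (ks : List String) (i : Nat) :
    pvBestSpec g (k :: ks) i =
      (match pvTV g k with
       | some v => some (i, v)
       | none => pvBestSpec g ks (i + 1)) := by
  rcases h : g k with _ | v
  · simp [pvBestSpec, pvTV, h]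
  · by_cases hv : v = "" <;> simp [pvBestSpec, pvTV, h, hv]

theorem pvBestSpec_congr (g g' : String → Option String) (ks : List String) (i : Nat)
    (h : ∀ k ∈ ks, pvTV g' k = pvTV g k) :
    pvBestSpec g' ks i = pvBestSpec g ks i := by
  induction ks generalizing i with
  | nil => rfl
  | cons k ks ih =>
    rw [pvBestSpec_cons_tv, pvBestSpec_cons_tv, h k (by simp),
      ih _ (fun x hx => h x (by simp [hx]))]

theorem pvBestSpec_append (g : String → Option String) (as bs : List String) (i : Nat) :
    pvBestSpec g (as ++ bs) i = (pvBestSpec g as i).or (pvBestSpec g bs (i + as.length)) := by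
  induction as generalizing i with
  | nil => simp [pvBestSpec]
  | cons a as ih =>
    rw [List.cons_append, pvBestSpec_cons_tv, pvBestSpec_cons_tv]
    rcases htv : pvTV g a with _ | v <;> simp [ih]
    have : i + 1 + as.length = i + (as.length + 1) := by omega
    simp [this]

theorem pvBestSpec_range (g : String → Option String) (ks : List String) (i j : Nat) (w : String)
    (h : pvBestSpec g ks i = some (j, w)) : i ≤ j ∧ j < i + ks.length := by
  induction ks generalizing i with
  | nil => simp [pvBestSpec] at h
  | cons k ks ih =>
    rw [pvBestSpec_cons_tv] at h
    rcases htv : pvTV g k with _ | v <;> simp [htv] at h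
    · have := ih (i + 1) h; simp only [List.length_cons]; omega
    · obtain ⟨h1, h2⟩ := h; subst h1; simp only [List.length_cons]; omega

-- facts about the truthy part of a lookup
theorem pvTV_some {g : String → Option String} {k v : String} (h : pvTV g k = some v) :
    g k = some v ∧ v ≠ "" := by
  unfold pvTV at h
  rcases hg : g k with _ | w <;> simp [hg] at h
  by_cases hw : w = "" <;> simp [hw] at h
  exact ⟨by rw [h], h ▸ hw⟩

theorem pvTV_pt {g g' : String → Option String} {k : String} (h : g k = g' k) :
    pvTV g k = pvTV g' k := by
  unfold pvTV; rw [h]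

theorem pvBestSpec_of_none (ks : List String) (i : Nat) :
    pvBestSpec (fun _ => none) ks i = none := by
  induction ks generalizing i with
  | nil => rfl
  | cons k ks ih => simp [pvBestSpec, ih]

-- main loop invariant: the fold over the record's (nodup-key) items computes pvBestSpec
theorem fold_fstep (f : String) (ks : List String)
    (h1 : ∀ (j : Nat) (k : String), ks[j]? = some k → pvRankOf k = some (f, j))
    (h2 : ∀ (k : String) (r : Nat), pvRankOf k = some (f, r) → ks[r]? = some k)
    (L : List (String × String)) (hnd : (L.map Prod.fst).Nodup) :
    L.foldl (pvFStep f) none = pvBestSpec (myLook L) ks 0 := by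
  induction L using List.reverseRecOn with
  | nil =>
    rw [show myLook [] = (fun _ => none) from funext (fun _ => rfl), pvBestSpec_of_none]
    rfl
  | append_singleton L p ih =>
    obtain ⟨k, v⟩ := p
    rw [List.map_append, List.nodup_append] at hnd
    obtain ⟨hndL, _, hdisj⟩ := hnd
    have hk : k ∉ L.map Prod.fst := fun hmem => hdisj k hmem k (by simp) rfl
    have hgk : myLook L k = none := myLook_eq_none L k hk
    have hne : ∀ x, x ≠ k → myLook (L ++ [(k, v)]) x = myLook L x := by
      intro x hx
      rw [myLook_append, if_neg (fun e : k = x => hx e.symm)]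
      exact Option.or_none
    have hk' : myLook (L ++ [(k, v)]) k = some v := by
      rw [myLook_append, hgk, if_pos rfl]; rfl
    rw [List.foldl_append, List.foldl_cons, List.foldl_nil, ih hndL]
    -- now: one pvFStep step matches extending the lookup at the fresh key k
    by_cases hv : v = ""
    · subst hv
      rw [show pvFStep f (pvBestSpec (myLook L) ks 0) (k, "") = pvBestSpec (myLook L) ks 0 by
        simp [pvFStep]]
      refine (pvBestSpec_congr _ _ _ _ ?_).symm
      intro x _
      by_cases hx : x = k
      · subst hx; simp [pvTV, hk', hgk]
      · exact pvTV_pt (hne x hx)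
    · have hnotin : (∀ x ∈ ks, x ≠ k) → pvBestSpec (myLook (L ++ [(k, v)])) ks 0 =
          pvBestSpec (myLook L) ks 0 := fun hout =>
        pvBestSpec_congr _ _ _ _ (fun x hx => pvTV_pt (hne x (hout x hx)))
      rcases hr : pvRankOf k with _ | ⟨f', r⟩
      · have hout : ∀ x ∈ ks, x ≠ k := by
          intro x hx e
          subst e
          obtain ⟨j, hj⟩ := List.mem_iff_getElem?.mp hx
          rw [h1 j x hj] at hr
          simp at hr
        rw [hnotin hout]
        simp [pvFStep, hv, hr]
      · by_cases hf : f' = f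
        · subst hf
          -- k is candidate number r of field f'
          have hks : ks[r]? = some k := h2 k r hr
          obtain ⟨hrlen, hkr⟩ := List.getElem?_eq_some_iff.mp hks
          have hdec : ks = ks.take r ++ k :: ks.drop (r + 1) := by
            conv_lhs => rw [← List.take_append_drop r ks]
            rw [List.drop_eq_getElem_cons hrlen, hkr]
          have hlen : (ks.take r).length = r := by
            rw [List.length_take]; omega
          have huniq : ∀ (j : Nat), ks[j]? = some k → j = r := by
            intro j hj
            have hrj := h1 j k hj
            rw [hr] at hrj
            simpa using hrj.symm
          have htake : ∀ x ∈ ks.take r, x ≠ k := by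
            intro x hx e
            subst e
            obtain ⟨j, hj⟩ := List.mem_iff_getElem?.mp hx
            rw [List.getElem?_take] at hj
            by_cases hjr : j < r
            · rw [if_pos hjr] at hj
              exact absurd (huniq j hj) (by omega)
            · rw [if_neg hjr] at hj; simp at hj
          have hdrop : ∀ x ∈ ks.drop (r + 1), x ≠ k := by
            intro x hx e
            subst e
            obtain ⟨j, hj⟩ := List.mem_iff_getElem?.mp hx
            rw [List.getElem?_drop] at hj
            exact absurd (huniq _ hj) (by omega)
          -- decompose both pvBestSpec computations around position r
          have hsplit : ∀ (g : String → Option String),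
              pvBestSpec g ks 0 = (pvBestSpec g (ks.take r) 0).or
                (pvBestSpec g (k :: ks.drop (r + 1)) r) := by
            intro g
            conv_lhs => rw [hdec]
            rw [pvBestSpec_append, hlen, Nat.zero_add]
          rw [hsplit (myLook L), hsplit (myLook (L ++ [(k, v)]))]
          have hT : pvBestSpec (myLook (L ++ [(k, v)])) (ks.take r) 0 =
              pvBestSpec (myLook L) (ks.take r) 0 :=
            pvBestSpec_congr _ _ _ _ (fun x hx => pvTV_pt (hne x (htake x hx)))
          have hD : pvBestSpec (myLook (L ++ [(k, v)])) (ks.drop (r + 1)) (r + 1) =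
              pvBestSpec (myLook L) (ks.drop (r + 1)) (r + 1) :=
            pvBestSpec_congr _ _ _ _ (fun x hx => pvTV_pt (hne x (hdrop x hx)))
          rw [pvBestSpec_cons_tv, pvBestSpec_cons_tv, hT, hD,
            show pvTV (myLook (L ++ [(k, v)])) k = some v by simp [pvTV, hk', hv],
            show pvTV (myLook L) k = none by simp [pvTV, hgk]]
          -- now a pure case analysis on the two halves, using the rank ranges
          rcases hTv : pvBestSpec (myLook L) (ks.take r) 0 with _ | ⟨j, w⟩
          · rw [Option.none_or, Option.none_or]
            rcases hDv : pvBestSpec (myLook L) (ks.drop (r + 1)) (r + 1) with _ | ⟨j, w⟩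
            · simp [pvFStep, hv, hr]
            · have hjr : r < j := by
                have := pvBestSpec_range _ _ _ _ _ hDv
                omega
              simp [pvFStep, hv, hr, hjr]
          · have hjr : j < r := by
              have := pvBestSpec_range _ _ _ _ _ hTv
              omega
            rw [Option.some_or, Option.some_or]
            simp [pvFStep, hv, hr, Nat.not_lt.mpr (Nat.le_of_lt hjr) ]
        · have hout : ∀ x ∈ ks, x ≠ k := by
            intro x hx e
            subst e
            obtain ⟨j, hj⟩ := List.mem_iff_getElem?.mp hx
            rw [h1 j x hj] at hr
            simp at hr
            exact hf hr.1.symm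
          rw [hnotin hout]
          simp [pvFStep, hv, hr, hf]

-- per-field bridge: B's emission from the loop result equals A's filter of the or-chain
def pvChain (g : String → Option String) : List String → Option String
  | [] => none
  | [k] => g k
  | k :: ks => if pvTruthy (g k) then g k else pvChain g ks

theorem pvChain_of_truthy (g : String → Option String) (k : String) (ks : List String)
    (h : pvTruthy (g k) = true) : pvChain g (k :: ks) = g k := by
  cases ks <;> simp [pvChain, h]

theorem emit_eq (g : String → Option String) (f : String) (ks : List String) (i : Nat) :
    (match pvBestSpec g ks i with
     | none => ([] : List (String × String))
     | some rv => if rv.2 ≠ "#" ∧ rv.2 ≠ "0" then [(f, rv.2)] else []) =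
    (if pvKeep (pvChain g ks) then [(f, (pvChain g ks).getD "")] else []) := by
  induction ks generalizing i with
  | nil => simp [pvBestSpec, pvChain, pvKeep]
  | cons k ks ih =>
    rw [pvBestSpec_cons_tv]
    rcases htv : pvTV g k with _ | v
    · have hkeep : pvKeep (g k) = false := by
        unfold pvTV at htv
        rcases hg : g k with _ | w <;> simp [hg] at htv ⊢ <;> simp [pvKeep]
        by_cases hw : w = "" <;> simp [hw] at htv ⊢
      have htr : pvTruthy (g k) = false := by
        unfold pvTV at htv
        rcases hg : g k with _ | w <;> simp [hg] at htv ⊢ <;> simp [pvTruthy]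
        by_cases hw : w = "" <;> simp [hw] at htv ⊢
      cases ks with
      | nil => simp [pvBestSpec, pvChain, hkeep]
      | cons k2 t =>
        rw [show pvChain g (k :: k2 :: t) = pvChain g (k2 :: t) by simp [pvChain, htr]]
        exact ih (i + 1)
    · obtain ⟨hg, hv⟩ := pvTV_some htv
      rw [pvChain_of_truthy g k ks (by simp [pvTruthy, hg, hv]), hg]
      by_cases h3 : v = "#" <;> by_cases h4 : v = "0" <;> simp [pvKeep, hv, h3, h4]

-- filtering-then-mapping a cons peels off one chunk, matching B's flatMap shape
theorem pv_filter_map_cons (k : String) (v : Option String) (l : List (String × Option String)) :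
    (((k, v) :: l).filter (fun p => pvKeep p.2)).map (fun p => (p.1, p.2.getD "")) =
      (if pvKeep v then [(k, v.getD "")] else []) ++
        ((l.filter (fun p => pvKeep p.2)).map (fun p => (p.1, p.2.getD ""))) := by
  cases h : pvKeep v <;> simp [h]

theorem lookup_mem {β : Type} (k : String) (v : β) (l : List (String × β)) (h : l.lookup k = some v) : (k, v) ∈ l := by
  induction l with
  | nil => simp [List.lookup] at h
  | cons p t ih =>
    cases p with
    | mk a b =>
      cases hk : k == a <;> simp [List.lookup_cons, hk] at h
      · exact List.mem_cons_of_mem _ (ih h)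
      · simp_all [beq_iff_eq]

-- ===== VERDICT (by name: the statement is the Claim_ definition above) =====
set_option maxHeartbeats 2000000 in
theorem summarize_dhcp_record_spec : Claim_equal_summarize_dhcp_record := by
  intro record _
  unfold Spec_summarize_dhcp_record
  cases record with
  | none => rfl
  | some d =>
    have hnd : (((PySem.Dict.ofList d).items.map Prod.fst)).Nodup := by
      have h := PySem.Dict.nodup_keys_ofList (ps := d)
      simpa [PySem.Dict.keys] using h
    have hml : myLook (PySem.Dict.ofList d : PySem.Dict String String).items =
        fun x => (PySem.Dict.ofList d).get? x := by
      funext x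
      rw [← myLook_eq_get?]
    have main : ∀ (f : String) (ks : List String),
        (∀ (j : Nat) (k : String), ks[j]? = some k → pvRankOf k = some (f, j)) →
        (∀ (k : String) (r : Nat), pvRankOf k = some (f, r) → ks[r]? = some k) →
        (match ((PySem.Dict.ofList d).items.foldl pvBStep PySem.Dict.empty).get? f with
         | none => ([] : List (String × String))
         | some rv => if rv.2 ≠ "#" ∧ rv.2 ≠ "0" then [(f, rv.2)] else []) =
        (if pvKeep (pvChain (fun x => (PySem.Dict.ofList d).get? x) ks) then
           [(f, (pvChain (fun x => (PySem.Dict.ofList d).get? x) ks).getD "")] else []) := by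
      intro f ks h1 h2
      rw [foldl_get?, PySem.Dict.get?_empty, fold_fstep f ks h1 h2 _ hnd, hml]
      exact emit_eq _ f ks 0
    have h_ip := main "ip" ["dhcphost_addr", "ip_address", "ip_addr", "hostaddr"]
      (by intro j k hj
          rcases j with _|_|_|_|j <;> simp at hj <;> subst hj <;> decide)
      (by intro k r h
          have hm := lookup_mem _ _ _ h
          simp [pvRANK, Prod.mk.injEq] at hm
          rcases hm with hm|hm|hm|hm <;> simp_all)
    have h_mac := main "mac" ["dhcphost_mac_addr", "mac_addr", "mac"]
      (by intro j k hj
          rcases j with _|_|_|j <;> simp at hj <;> subst hj <;> decide)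
      (by intro k r h
          have hm := lookup_mem _ _ _ h
          simp [pvRANK, Prod.mk.injEq] at hm
          rcases hm with hm|hm|hm <;> simp_all)
    have h_name := main "name" ["dhcphost_name", "db_hostname", "name"]
      (by intro j k hj
          rcases j with _|_|_|j <;> simp at hj <;> subst hj <;> decide)
      (by intro k r h
          have hm := lookup_mem _ _ _ h
          simp [pvRANK, Prod.mk.injEq] at hm
          rcases hm with hm|hm|hm <;> simp_all)
    have h_scope := main "scope" ["dhcpscope_name", "scope_name"]
      (by intro j k hj
          rcases j with _|_|j <;> simp at hj <;> subst hj <;> decide)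
      (by intro k r h
          have hm := lookup_mem _ _ _ h
          simp [pvRANK, Prod.mk.injEq] at hm
          rcases hm with hm|hm <;> simp_all)
    have h_server := main "server" ["dhcp_name", "dhcpsrv_name"]
      (by intro j k hj
          rcases j with _|_|j <;> simp at hj <;> subst hj <;> decide)
      (by intro k r h
          have hm := lookup_mem _ _ _ h
          simp [pvRANK, Prod.mk.injEq] at hm
          rcases hm with hm|hm <;> simp_all)
    have h_site := main "site" ["site_name", "dhcpscope_site_id"]
      (by intro j k hj
          rcases j with _|_|j <;> simp at hj <;> subst hj <;> decide)
      (by intro k r h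
          have hm := lookup_mem _ _ _ h
          simp [pvRANK, Prod.mk.injEq] at hm
          rcases hm with hm|hm <;> simp_all)
    have h_state := main "state" ["dhcphost_state"]
      (by intro j k hj
          rcases j with _|j <;> simp at hj <;> subst hj <;> decide)
      (by intro k r h
          have hm := lookup_mem _ _ _ h
          simp [pvRANK, Prod.mk.injEq] at hm
          simp_all)
    simp only [summarize_dhcp_record, summarize_dhcp_record_alt, pvFields,
      List.flatMap_cons, List.flatMap_nil, List.append_nil, pv_filter_map_cons,
      List.filter_nil, List.map_nil]
    rw [h_ip, h_mac, h_name, h_scope, h_server, h_site, h_state]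
    simp only [pvChain, pvOr]
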